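-- pv_equiv track=rewrite | github.com/ujjwal-45/codeforces | Knights_path.py | get_bishop_positions
-- ===== SOURCE A (Python) =====
-- def get_bishop_positions(n,bishop_row,bishop_col):
--     threatened = set()
--
--     for d_row,d_col in [(-1,1),(-1,-1),(1,1),(1,-1)]:
--         row,col = bishop_row,bishop_col
--         while 0<=row<n and 0<=col<n:
--             threatened.add((row,col))
--             row+=d_row
--             col+=d_col
--
--     return threatened
-- ===== SOURCE B (Python) =====
-- def get_bishop_positions(n, bishop_row, bishop_col):
--     if not (0 <= bishop_row < n and 0 <= bishop_col < n):
--         return set()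
--
--     def up_right(r, c):
--         # up-right ray from (r, c): the cells (i, s - i) of the anti-diagonal
--         # s = r + c, with row i running from r down to where the ray leaves the board
--         s = r + c
--         return [(i, s - i) for i in range(r, max(0, s - (n - 1)) - 1, -1)]
--
--     def flip_rows(cells):
--         return [(n - 1 - i, j) for (i, j) in cells]
--
--     def flip_cols(cells):
--         return [(i, n - 1 - j) for (i, j) in cells]
--
--     r, c = bishop_row, bishop_col
--     return set(up_right(r, c)
--                + flip_cols(up_right(r, n - 1 - c))
--                + flip_rows(up_right(n - 1 - r, c))
--                + flip_rows(flip_cols(up_right(n - 1 - r, n - 1 - c))))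
-- ===== Notes on version B (the rewrite author's own statement) =====
-- stated objective: alternative
-- what changed: A walks all four diagonal directions cell by cell with bounds-checked while loops; B implements a single geometric primitive - the up-right ray, written in closed form over the anti-diagonal invariant s = row + col as one clipped range - and obtains the other three rays by reflecting the board (flip rows / flip columns), after an explicit off-board early return.
import Mathlib
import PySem

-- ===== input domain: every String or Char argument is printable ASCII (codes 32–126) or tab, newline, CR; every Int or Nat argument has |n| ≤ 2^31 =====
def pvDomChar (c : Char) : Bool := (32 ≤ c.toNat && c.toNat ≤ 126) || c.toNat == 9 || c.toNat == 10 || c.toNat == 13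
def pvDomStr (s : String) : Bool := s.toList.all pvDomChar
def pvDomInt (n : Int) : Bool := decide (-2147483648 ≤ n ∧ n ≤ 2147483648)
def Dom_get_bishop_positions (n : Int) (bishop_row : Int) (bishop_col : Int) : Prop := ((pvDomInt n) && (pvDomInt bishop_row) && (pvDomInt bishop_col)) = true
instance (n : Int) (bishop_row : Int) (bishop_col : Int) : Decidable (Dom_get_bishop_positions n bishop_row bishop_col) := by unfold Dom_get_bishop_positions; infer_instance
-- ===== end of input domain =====

-- B replaces A's four bounds-checked direction walks by ONE closed-form up-right ray
-- (a clipped countdown range over the anti-diagonal invariant s = row + col) plus three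
-- board reflections (objective: alternative).

-- ===== PORT A =====
-- A's for-loop over the literal direction list [(-1,1),(-1,-1),(1,1),(1,-1)] is unrolled:
-- each while loop becomes one recursive helper over the same state (row, col, threatened).
def pvRayNE (n row col : Int) (s : List (Int × Int)) : List (Int × Int) :=
  if 0 ≤ row ∧ row < n ∧ 0 ≤ col ∧ col < n then
    pvRayNE n (row - 1) (col + 1) (PySem.Set.add s (row, col))
  else s
termination_by (row + 1).toNat
decreasing_by omega

def pvRayNW (n row col : Int) (s : List (Int × Int)) : List (Int × Int) :=
  if 0 ≤ row ∧ row < n ∧ 0 ≤ col ∧ col < n then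
    pvRayNW n (row - 1) (col - 1) (PySem.Set.add s (row, col))
  else s
termination_by (row + 1).toNat
decreasing_by omega

def pvRaySE (n row col : Int) (s : List (Int × Int)) : List (Int × Int) :=
  if 0 ≤ row ∧ row < n ∧ 0 ≤ col ∧ col < n then
    pvRaySE n (row + 1) (col + 1) (PySem.Set.add s (row, col))
  else s
termination_by (n - row).toNat
decreasing_by omega

def pvRaySW (n row col : Int) (s : List (Int × Int)) : List (Int × Int) :=
  if 0 ≤ row ∧ row < n ∧ 0 ≤ col ∧ col < n then
    pvRaySW n (row + 1) (col - 1) (PySem.Set.add s (row, col))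
  else s
termination_by (n - row).toNat
decreasing_by omega

def get_bishop_positions (n : Int) (bishop_row : Int) (bishop_col : Int) : List (Int × Int) :=
  pvRaySW n bishop_row bishop_col
    (pvRaySE n bishop_row bishop_col
      (pvRayNW n bishop_row bishop_col
        (pvRayNE n bishop_row bishop_col PySem.Set.empty)))

-- ===== PORT B =====
-- up_right(r, c): the cells (i, s - i), s = r + c, for i in range(r, max(0, s-(n-1)) - 1, -1)
def pvUpRight (n r c : Int) : List (Int × Int) :=
  (PySem.List.pyRange r (max 0 (r + c - (n - 1)) - 1) (-1)).map (fun i => (i, r + c - i))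

def pvFlipRows (n : Int) (cells : List (Int × Int)) : List (Int × Int) :=
  cells.map (fun p => (n - 1 - p.1, p.2))

def pvFlipCols (n : Int) (cells : List (Int × Int)) : List (Int × Int) :=
  cells.map (fun p => (p.1, n - 1 - p.2))

def get_bishop_positions_alt (n : Int) (bishop_row : Int) (bishop_col : Int) : List (Int × Int) :=
  if 0 ≤ bishop_row ∧ bishop_row < n ∧ 0 ≤ bishop_col ∧ bishop_col < n then
    PySem.Set.ofList
      (pvUpRight n bishop_row bishop_col
        ++ pvFlipCols n (pvUpRight n bishop_row (n - 1 - bishop_col))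
        ++ pvFlipRows n (pvUpRight n (n - 1 - bishop_row) bishop_col)
        ++ pvFlipRows n (pvFlipCols n (pvUpRight n (n - 1 - bishop_row) (n - 1 - bishop_col))))
  else PySem.Set.empty

-- ===== PRECONDITION & SPEC =====
def Spec_get_bishop_positions (n : Int) (bishop_row : Int) (bishop_col : Int) (out : List (Int × Int)) : Prop := out = get_bishop_positions_alt n bishop_row bishop_col
instance (n : Int) (bishop_row : Int) (bishop_col : Int) (out : List (Int × Int)) : Decidable (Spec_get_bishop_positions n bishop_row bishop_col out) := by unfold Spec_get_bishop_positions; infer_instance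

-- ===== CLAIM (what is proved, stated in full; the proofs are below) =====
def Claim_equal_get_bishop_positions : Prop := ∀ (n : Int) (bishop_row : Int) (bishop_col : Int), Dom_get_bishop_positions n bishop_row bishop_col → Spec_get_bishop_positions n bishop_row bishop_col (get_bishop_positions n bishop_row bishop_col)

-- ===== LEMMAS AND PROOFS =====

theorem pvRange_map_succ (b : Int) (hb : 0 ≤ b) (f : Int → Int × Int) :
    (PySem.List.pyRange 0 (b + 1) 1).map f
      = f 0 :: (PySem.List.pyRange 0 b 1).map (fun t => f (t + 1)) := by
  rw [PySem.List.pyRange_one, PySem.List.pyRange_one]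
  simp only [sub_zero, List.map_map]
  have h1 : (b + 1).toNat = b.toNat + 1 := by omega
  rw [h1, List.range_succ_eq_map, List.map_cons, List.map_map]
  congr 1

theorem pvRayNE_eq (n : Int) (k : Nat) :
    ∀ (row col : Int) (s : List (Int × Int)),
      0 ≤ row → row < n → 0 ≤ col → col < n →
      min row (n - 1 - col) = (k : Int) →
      pvRayNE n row col s
        = PySem.Set.update s
            ((PySem.List.pyRange 0 ((k : Int) + 1) 1).map (fun t => (row - t, col + t))) := by
  induction k with
  | zero =>
    intro row col s h1 h2 h3 h4 hk
    rw [pvRayNE, if_pos ⟨h1, h2, h3, h4⟩, pvRayNE, if_neg (by omega)]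
    rw [show ((0 : Nat) : Int) = 0 from rfl, pvRange_map_succ 0 le_rfl,
        PySem.List.pyRange_one_eq_nil le_rfl]
    simp [PySem.Set.update_cons, PySem.Set.update_nil]
  | succ k ih =>
    intro row col s h1 h2 h3 h4 hk
    rw [pvRayNE, if_pos ⟨h1, h2, h3, h4⟩,
        ih (row - 1) (col + 1) _ (by omega) (by omega) (by omega) (by omega) (by omega),
        pvRange_map_succ ((k + 1 : Nat) : Int) (by omega), PySem.Set.update_cons]
    rw [show (((k + 1 : Nat)) : Int) = (k : Int) + 1 by push_cast; ring]
    congr 1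
    · norm_num
    · apply List.map_congr_left
      intro t ht
      congr 1 <;> ring

theorem pvRayNW_eq (n : Int) (k : Nat) :
    ∀ (row col : Int) (s : List (Int × Int)),
      0 ≤ row → row < n → 0 ≤ col → col < n →
      min row col = (k : Int) →
      pvRayNW n row col s
        = PySem.Set.update s
            ((PySem.List.pyRange 0 ((k : Int) + 1) 1).map (fun t => (row - t, col - t))) := by
  induction k with
  | zero =>
    intro row col s h1 h2 h3 h4 hk
    rw [pvRayNW, if_pos ⟨h1, h2, h3, h4⟩, pvRayNW, if_neg (by omega)]
    rw [show ((0 : Nat) : Int) = 0 from rfl, pvRange_map_succ 0 le_rfl,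
        PySem.List.pyRange_one_eq_nil le_rfl]
    simp [PySem.Set.update_cons, PySem.Set.update_nil]
  | succ k ih =>
    intro row col s h1 h2 h3 h4 hk
    rw [pvRayNW, if_pos ⟨h1, h2, h3, h4⟩,
        ih (row - 1) (col - 1) _ (by omega) (by omega) (by omega) (by omega) (by omega),
        pvRange_map_succ ((k + 1 : Nat) : Int) (by omega), PySem.Set.update_cons]
    rw [show (((k + 1 : Nat)) : Int) = (k : Int) + 1 by push_cast; ring]
    congr 1
    · norm_num
    · apply List.map_congr_left
      intro t ht
      congr 1 <;> ring

theorem pvRaySE_eq (n : Int) (k : Nat) :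
    ∀ (row col : Int) (s : List (Int × Int)),
      0 ≤ row → row < n → 0 ≤ col → col < n →
      min (n - 1 - row) (n - 1 - col) = (k : Int) →
      pvRaySE n row col s
        = PySem.Set.update s
            ((PySem.List.pyRange 0 ((k : Int) + 1) 1).map (fun t => (row + t, col + t))) := by
  induction k with
  | zero =>
    intro row col s h1 h2 h3 h4 hk
    rw [pvRaySE, if_pos ⟨h1, h2, h3, h4⟩, pvRaySE, if_neg (by omega)]
    rw [show ((0 : Nat) : Int) = 0 from rfl, pvRange_map_succ 0 le_rfl,
        PySem.List.pyRange_one_eq_nil le_rfl]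
    simp [PySem.Set.update_cons, PySem.Set.update_nil]
  | succ k ih =>
    intro row col s h1 h2 h3 h4 hk
    rw [pvRaySE, if_pos ⟨h1, h2, h3, h4⟩,
        ih (row + 1) (col + 1) _ (by omega) (by omega) (by omega) (by omega) (by omega),
        pvRange_map_succ ((k + 1 : Nat) : Int) (by omega), PySem.Set.update_cons]
    rw [show (((k + 1 : Nat)) : Int) = (k : Int) + 1 by push_cast; ring]
    congr 1
    · norm_num
    · apply List.map_congr_left
      intro t ht
      congr 1 <;> ring

theorem pvRaySW_eq (n : Int) (k : Nat) :
    ∀ (row col : Int) (s : List (Int × Int)),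
      0 ≤ row → row < n → 0 ≤ col → col < n →
      min (n - 1 - row) col = (k : Int) →
      pvRaySW n row col s
        = PySem.Set.update s
            ((PySem.List.pyRange 0 ((k : Int) + 1) 1).map (fun t => (row + t, col - t))) := by
  induction k with
  | zero =>
    intro row col s h1 h2 h3 h4 hk
    rw [pvRaySW, if_pos ⟨h1, h2, h3, h4⟩, pvRaySW, if_neg (by omega)]
    rw [show ((0 : Nat) : Int) = 0 from rfl, pvRange_map_succ 0 le_rfl,
        PySem.List.pyRange_one_eq_nil le_rfl]
    simp [PySem.Set.update_cons, PySem.Set.update_nil]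
  | succ k ih =>
    intro row col s h1 h2 h3 h4 hk
    rw [pvRaySW, if_pos ⟨h1, h2, h3, h4⟩,
        ih (row + 1) (col - 1) _ (by omega) (by omega) (by omega) (by omega) (by omega),
        pvRange_map_succ ((k + 1 : Nat) : Int) (by omega), PySem.Set.update_cons]
    rw [show (((k + 1 : Nat)) : Int) = (k : Int) + 1 by push_cast; ring]
    congr 1
    · norm_num
    · apply List.map_congr_left
      intro t ht
      congr 1 <;> ring

-- a descending ray (countdown range mapped through g) equals an ascending ray (range-from-0 mapped through f)
theorem pvRayDescAsc (a m K : Int) (hK : a - max 0 m + 1 = K + 1)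
    (g f : Int → Int × Int) (hfg : ∀ k : Int, 0 ≤ k → g (a - k) = f k) :
    (PySem.List.pyRange a (max 0 m - 1) (-1)).map g
      = (PySem.List.pyRange 0 (K + 1) 1).map f := by
  rw [PySem.List.pyRange_neg_one, PySem.List.pyRange_one]
  simp only [List.map_map, sub_zero]
  have hlen : (a - (max 0 m - 1)).toNat = (K + 1).toNat := by omega
  rw [hlen]
  apply List.map_congr_left
  intro k _
  simp only [Function.comp]
  rw [hfg (k : Int) (by positivity), zero_add]

-- ===== VERDICT (by name: the statement is the Claim_ definition above) =====
theorem get_bishop_positions_spec : Claim_equal_get_bishop_positions := by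
  intro n r c _
  unfold Spec_get_bishop_positions get_bishop_positions get_bishop_positions_alt
  by_cases h : 0 ≤ r ∧ r < n ∧ 0 ≤ c ∧ c < n
  · obtain ⟨h1, h2, h3, h4⟩ := h
    rw [if_pos ⟨h1, h2, h3, h4⟩]
    have e1 : min r (n - 1 - c) = ((min r (n - 1 - c)).toNat : Int) := by omega
    have e2 : min r c = ((min r c).toNat : Int) := by omega
    have e3 : min (n - 1 - r) (n - 1 - c) = ((min (n - 1 - r) (n - 1 - c)).toNat : Int) := by omega
    have e4 : min (n - 1 - r) c = ((min (n - 1 - r) c).toNat : Int) := by omega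
    rw [pvRayNE_eq n _ r c _ h1 h2 h3 h4 e1,
        pvRayNW_eq n _ r c _ h1 h2 h3 h4 e2,
        pvRaySE_eq n _ r c _ h1 h2 h3 h4 e3,
        pvRaySW_eq n _ r c _ h1 h2 h3 h4 e4]
    rw [← e1, ← e2, ← e3, ← e4]
    have b1 : pvUpRight n r c
        = (PySem.List.pyRange 0 (min r (n - 1 - c) + 1) 1).map (fun t => (r - t, c + t)) := by
      unfold pvUpRight
      exact pvRayDescAsc r (r + c - (n - 1)) (min r (n - 1 - c)) (by omega) _ _
        (fun k _ => by simp only [Prod.mk.injEq, true_and]; omega)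
    have b2 : pvFlipCols n (pvUpRight n r (n - 1 - c))
        = (PySem.List.pyRange 0 (min r c + 1) 1).map (fun t => (r - t, c - t)) := by
      unfold pvFlipCols pvUpRight
      rw [List.map_map]
      exact pvRayDescAsc r (r + (n - 1 - c) - (n - 1)) (min r c) (by omega) _ _
        (fun k _ => by simp only [Function.comp, Prod.mk.injEq, true_and]; omega)
    have b3 : pvFlipRows n (pvUpRight n (n - 1 - r) c)
        = (PySem.List.pyRange 0 (min (n - 1 - r) (n - 1 - c) + 1) 1).map (fun t => (r + t, c + t)) := by
      unfold pvFlipRows pvUpRight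
      rw [List.map_map]
      exact pvRayDescAsc (n - 1 - r) ((n - 1 - r) + c - (n - 1)) (min (n - 1 - r) (n - 1 - c)) (by omega) _ _
        (fun k _ => by simp only [Function.comp, Prod.mk.injEq]; omega)
    have b4 : pvFlipRows n (pvFlipCols n (pvUpRight n (n - 1 - r) (n - 1 - c)))
        = (PySem.List.pyRange 0 (min (n - 1 - r) c + 1) 1).map (fun t => (r + t, c - t)) := by
      unfold pvFlipRows pvFlipCols pvUpRight
      rw [List.map_map, List.map_map]
      exact pvRayDescAsc (n - 1 - r) ((n - 1 - r) + (n - 1 - c) - (n - 1)) (min (n - 1 - r) c) (by omega) _ _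
        (fun k _ => by simp only [Function.comp, Prod.mk.injEq]; omega)
    rw [b1, b2, b3, b4]
    rw [PySem.Set.ofList_append, PySem.Set.ofList_append, PySem.Set.ofList_append]
    rw [show (PySem.Set.empty : List (Int × Int)) = [] from rfl,
        ← PySem.Set.update_nil_left
          ((PySem.List.pyRange 0 (min r (n - 1 - c) + 1) 1).map (fun t => (r - t, c + t)))]
  · rw [if_neg h]
    rw [pvRayNE, if_neg h, pvRayNW, if_neg h, pvRaySE, if_neg h, pvRaySW, if_neg h]
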